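-- pv_equiv track=rewrite | github.com/Usaywook/algorithm.study | IslandEscape/ref3.py | rotates
-- ===== SOURCE A (Python) =====
-- def rotates(data, k=2):
--     stack = [([], 0, set())]
--     while stack:
--         comb, idx, select  = stack.pop()
--         if len(comb) == k:
--             yield  comb + [data[i] for i in set(range(len(data))) - select]
--             continue
--
--         for i in range(idx, len(data)):
--             stack.append((comb + [data[i]], i+1, select | {i}))
-- ===== SOURCE B (Python) =====
-- def rotates(data, k=2):
--     n = len(data)
--     if k < 0:
--         return
--
--     def combos(start, r):
--         if r == 0:
--             yield []
--             return
--         for first in range(n - r, start - 1, -1):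
--             for rest in combos(first + 1, r - 1):
--                 yield [first] + rest
--
--     for idxs in combos(0, k):
--         chosen = set(idxs)
--         yield [data[i] for i in idxs] + [data[j] for j in range(n) if j not in chosen]
-- ===== Notes on version B (the rewrite author's own statement) =====
-- stated objective: alternative
-- what changed: Replaces the explicit stack-DFS over (partial-combination, index, selected-set) states with a recursive generator that yields index k-combinations directly in A's reverse-lexicographic order, emitting each row as the chosen indices followed by an ascending complement scan.
import Mathlib
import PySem

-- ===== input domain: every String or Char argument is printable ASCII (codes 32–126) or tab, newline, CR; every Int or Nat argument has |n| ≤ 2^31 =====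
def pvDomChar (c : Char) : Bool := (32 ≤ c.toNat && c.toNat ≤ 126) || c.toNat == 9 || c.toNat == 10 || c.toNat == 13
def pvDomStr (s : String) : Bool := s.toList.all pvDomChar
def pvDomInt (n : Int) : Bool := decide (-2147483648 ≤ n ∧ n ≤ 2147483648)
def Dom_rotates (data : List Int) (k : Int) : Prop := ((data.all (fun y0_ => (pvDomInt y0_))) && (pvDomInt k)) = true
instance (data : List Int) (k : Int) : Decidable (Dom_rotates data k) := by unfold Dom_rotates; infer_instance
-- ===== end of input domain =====

-- B replaces A's explicit stack-DFS over (partial combination, index, selected set) states by a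
-- recursive combination generator in the same emission order plus an ascending complement scan (objective: alternative).

-- ===== PORT A =====
-- A's while-loop over a Python stack (pop from the END) is ported with the stack list reversed:
-- head of the Lean list = top of the Python stack; the children pushed for i = idx..n-1 (top = n-1)
-- therefore appear reversed at the FRONT.
def pvChildren (data : List Int) (comb : List Int) (idx : Int) (select : PySem.Set Int) :
    List (List Int × Int × PySem.Set Int) :=
  (PySem.List.pyRange idx (data.length : Int) 1).reverse.map
    (fun i => (comb ++ [PySem.List.pyGetD data i 0], i + 1, PySem.Set.add select i))

def pvMeasure (n : Int) (stack : List (List Int × Int × PySem.Set Int)) : Nat :=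
  (stack.map (fun s => 2 ^ ((n - s.2.1).toNat))).sum

-- termination bound for the DFS stack (cited by decreasing_by)
theorem pvChildrenSum (n : Int) : ∀ (m : Nat) (idx : Int), (n - idx).toNat = m →
    ((PySem.List.pyRange idx n 1).map (fun i => 2 ^ ((n - (i + 1)).toNat))).sum + 1 ≤ 2 ^ m := by
  intro m
  induction m with
  | zero =>
    intro idx h
    rw [PySem.List.pyRange_one_eq_nil (by omega)]
    simp
  | succ m ih =>
    intro idx h
    rw [PySem.List.pyRange_one_cons (by omega)]
    have h2 : (n - (idx + 1)).toNat = m := by omega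
    have hrest := ih (idx + 1) h2
    simp only [List.map_cons, List.sum_cons, h2, pow_succ]
    omega

theorem pvMeasureChildren (data : List Int) (comb : List Int) (idx : Int) (select : PySem.Set Int) :
    pvMeasure (data.length : Int) (pvChildren data comb idx select) + 1 ≤ 2 ^ (((data.length : Int) - idx).toNat) := by
  have h := pvChildrenSum (data.length : Int) (((data.length : Int) - idx).toNat) idx rfl
  simp only [pvMeasure, pvChildren, List.map_reverse, List.map_map, List.sum_reverse]
  simpa using h

def rotatesLoop (data : List Int) (k : Int) (stack : List (List Int × Int × PySem.Set Int))
    (acc : List (List Int)) : List (List Int) :=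
  match stack with
  | [] => acc
  | (comb, idx, select) :: rest =>
    if (comb.length : Int) = k then
      -- yield comb + [data[i] for i in set(range(len(data))) - select]
      -- (set iteration order: ascending = first-insertion order of the difference; exact inside Pre_)
      rotatesLoop data k rest
        (acc ++ [comb ++ (PySem.Set.diff (PySem.Set.ofList (PySem.List.pyRange 0 (data.length : Int) 1)) select).map
          (fun i => PySem.List.pyGetD data i 0)])
    else
      rotatesLoop data k (pvChildren data comb idx select ++ rest) acc
termination_by pvMeasure (data.length : Int) stack
decreasing_by
  · simp only [pvMeasure, List.map_cons, List.sum_cons]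
    have : 0 < 2 ^ (((data.length : Int) - idx).toNat) := Nat.two_pow_pos _
    omega
  · have h := pvMeasureChildren data comb idx select
    simp only [pvMeasure, List.map_cons, List.sum_cons, List.map_append, List.sum_append] at *
    omega

def rotates (data : List Int) (k : Int) : List (List Int) :=
  rotatesLoop data k [([], 0, PySem.Set.empty)] []

-- ===== PORT B =====
def altCombos (n : Int) : Nat → Int → List (List Int)
  | 0, _ => [[]]
  | r + 1, start =>
    (PySem.List.pyRange (n - ((r : Int) + 1)) (start - 1) (-1)).flatMap
      (fun first => (altCombos n r (first + 1)).map (fun rest => first :: rest))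

def rotates_alt (data : List Int) (k : Int) : List (List Int) :=
  if k < 0 then []
  else
    (altCombos (data.length : Int) k.toNat 0).map (fun idxs =>
      idxs.map (fun i => PySem.List.pyGetD data i 0) ++
        ((PySem.List.pyRange 0 (data.length : Int) 1).filter
          (fun j => !(PySem.Set.contains (PySem.Set.ofList idxs) j))).map
          (fun j => PySem.List.pyGetD data j 0))

-- ===== PRECONDITION & SPEC =====
-- the CPython set resize table: for a set holding m elements (lo ≤ m ≤ hi per row) the final
-- hash table has T slots, so iteration over inserted values 0..n-1 is ascending whenever n ≤ T
def pvSetTables : List (Int × Int × Int) :=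
  [(2, 4, 8), (5, 18, 32), (19, 76, 128), (77, 306, 512), (307, 1228, 2048),
   (1229, 4914, 8192), (4915, 19660, 32768), (19661, 78642, 131072),
   (78643, 157285, 262144), (157286, 314572, 524288), (314573, 629144, 1048576),
   (629145, 1258290, 2097152), (1258291, 2516581, 4194304), (2516582, 5033164, 8388608),
   (5033165, 10066328, 16777216), (10066329, 20132658, 33554432),
   (20132659, 40265317, 67108864), (40265318, 80530636, 134217728),
   (80530637, 161061272, 268435456), (161061273, 322122546, 536870912),
   (322122547, 644245093, 1073741824), (644245094, 1288490188, 2147483648),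
   (1288490189, 2576980376, 4294967296), (2576980377, 5153960754, 8589934592)]

-- Pre_ excludes exactly the inputs on which A's output order depends on CPython's hash-table iteration
-- order of 'set(range(len(data))) - select': when some complement index is at least the final table size
-- T(m) of a CPython set holding m = n-k elements, indices wrap modulo T and the emitted complement order
-- is an artefact of the hash table; inside Pre_ (n ≤ T(m), per the resize table pvSetTables for every
-- table size up to 2^33, and for lists of ANY length via the sufficient bound 3n ≤ 5(n-k), since
-- T(m) > 5m/3 always) that order is provably ascending. There is no size cap: every length n is
-- admitted for suitable k, and every k ≤ 2n/5 is admitted at any length.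
def Pre_rotates (data : List Int) (k : Int) : Prop :=
  k < 0 ∨ (data.length : Int) < k ∨ (data.length : Int) - k ≤ 1 ∨
  3 * (data.length : Int) ≤ 5 * ((data.length : Int) - k) ∨
  (pvSetTables.any (fun t =>
    decide (t.1 ≤ (data.length : Int) - k) && decide ((data.length : Int) - k ≤ t.2.1) &&
    decide ((data.length : Int) ≤ t.2.2))) = true
instance (data : List Int) (k : Int) : Decidable (Pre_rotates data k) := by
  unfold Pre_rotates; infer_instance

def pvWitness_rotates : List Int × Int := ([1, 2, 3], 2)

def Spec_rotates (data : List Int) (k : Int) (out : List (List Int)) : Prop := out = rotates_alt data k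
instance (data : List Int) (k : Int) (out : List (List Int)) : Decidable (Spec_rotates data k out) := by unfold Spec_rotates; infer_instance

-- ===== CLAIM (what is proved, stated in full; the proofs are below) =====
def Claim_equal_rotates : Prop := ∀ (data : List Int) (k : Int), Dom_rotates data k → Pre_rotates data k → Spec_rotates data k (rotates data k)

-- ===== LEMMAS AND PROOFS =====

def pvE (data : List Int) (k : Int) (s : List Int × Int × PySem.Set Int) : List (List Int) :=
  rotatesLoop data k [s] []

def pvRow (data : List Int) (idxs : List Int) : List Int :=
  idxs.map (fun i => PySem.List.pyGetD data i 0) ++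
    ((PySem.List.pyRange 0 (data.length : Int) 1).filter
      (fun j => !(PySem.Set.contains (PySem.Set.ofList idxs) j))).map
      (fun j => PySem.List.pyGetD data j 0)

theorem pvMeasure_cons (n : Int) (s : List Int × Int × PySem.Set Int)
    (t : List (List Int × Int × PySem.Set Int)) :
    pvMeasure n (s :: t) = 2 ^ ((n - s.2.1).toNat) + pvMeasure n t := by
  simp [pvMeasure]

theorem pvMeasure_append (n : Int) (t1 t2 : List (List Int × Int × PySem.Set Int)) :
    pvMeasure n (t1 ++ t2) = pvMeasure n t1 + pvMeasure n t2 := by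
  simp [pvMeasure]

-- the accumulator only collects output at the front
theorem pvShift (data : List Int) (k : Int) : ∀ (N : Nat) (stack : List (List Int × Int × PySem.Set Int)),
    pvMeasure (data.length : Int) stack ≤ N → ∀ acc,
    rotatesLoop data k stack acc = acc ++ rotatesLoop data k stack [] := by
  intro N
  induction N with
  | zero =>
    intro stack h acc
    match stack with
    | [] => simp [rotatesLoop]
    | s :: t =>
      exfalso
      have := Nat.two_pow_pos (((data.length : Int) - s.2.1).toNat)
      rw [pvMeasure_cons] at h; omega
  | succ N ih =>
    intro stack h acc
    match stack with
    | [] => simp [rotatesLoop]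
    | (comb, idx, select) :: t =>
      rw [pvMeasure_cons] at h
      dsimp only at h
      have hw := Nat.two_pow_pos (((data.length : Int) - idx).toNat)
      by_cases hleaf : (comb.length : Int) = k
      · rw [rotatesLoop, rotatesLoop]
        simp only [hleaf, if_true]
        rw [ih t (by omega) _, ih t (by omega) ([] ++ _)]
        simp
      · rw [rotatesLoop, rotatesLoop]
        simp only [if_neg hleaf]
        have hc := pvMeasureChildren data comb idx select
        have hm : pvMeasure (data.length : Int) (pvChildren data comb idx select ++ t) ≤ N := by
          rw [pvMeasure_append]; omega
        rw [ih _ hm acc]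

-- the stack is processed segment by segment
theorem pvSplit (data : List Int) (k : Int) : ∀ (N : Nat) (st1 : List (List Int × Int × PySem.Set Int)),
    pvMeasure (data.length : Int) st1 ≤ N → ∀ st2 acc,
    rotatesLoop data k (st1 ++ st2) acc = rotatesLoop data k st2 (rotatesLoop data k st1 acc) := by
  intro N
  induction N with
  | zero =>
    intro st1 h st2 acc
    match st1 with
    | [] => simp [rotatesLoop]
    | s :: t =>
      exfalso
      have := Nat.two_pow_pos (((data.length : Int) - s.2.1).toNat)
      rw [pvMeasure_cons] at h; omega
  | succ N ih =>
    intro st1 h st2 acc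
    match st1 with
    | [] => simp [rotatesLoop]
    | (comb, idx, select) :: t =>
      rw [pvMeasure_cons] at h
      dsimp only at h
      have hw := Nat.two_pow_pos (((data.length : Int) - idx).toNat)
      by_cases hleaf : (comb.length : Int) = k
      · rw [List.cons_append, rotatesLoop, rotatesLoop]
        simp only [hleaf, if_true]
        exact ih t (by omega) st2 _
      · rw [List.cons_append, rotatesLoop, rotatesLoop]
        simp only [if_neg hleaf]
        have hc := pvMeasureChildren data comb idx select
        rw [ih (pvChildren data comb idx select) (by omega) (t ++ st2) acc]
        rw [ih t (by omega) st2 _]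
        rw [ih (pvChildren data comb idx select) (by omega) t acc]

-- the loop's output is the concatenation of the per-state outputs
theorem pvFlat (data : List Int) (k : Int) : ∀ (st : List (List Int × Int × PySem.Set Int)),
    rotatesLoop data k st [] = (st.map (pvE data k)).flatten := by
  intro st
  induction st with
  | nil => simp [rotatesLoop]
  | cons s t ih =>
    have h1 : rotatesLoop data k ([s] ++ t) [] = rotatesLoop data k t (rotatesLoop data k [s] []) :=
      pvSplit data k (pvMeasure (data.length : Int) [s]) [s] le_rfl t []
    have h2 : rotatesLoop data k t (pvE data k s) = pvE data k s ++ rotatesLoop data k t [] :=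
      pvShift data k (pvMeasure (data.length : Int) t) t le_rfl _
    simp only [List.singleton_append] at h1
    rw [h1]
    show rotatesLoop data k t (pvE data k s) = _
    rw [h2, ih]
    simp

-- a state whose partial combination is already longer than k produces no output
theorem pvOver (data : List Int) (k : Int) : ∀ (N : Nat) (s : List Int × Int × PySem.Set Int),
    pvMeasure (data.length : Int) [s] ≤ N → k < (s.1.length : Int) → pvE data k s = [] := by
  intro N
  induction N with
  | zero =>
    intro s h _
    exfalso
    have := Nat.two_pow_pos (((data.length : Int) - s.2.1).toNat)
    rw [pvMeasure_cons] at h; omega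
  | succ N ih =>
    intro s h hlen
    obtain ⟨comb, idx, select⟩ := s
    simp only at hlen
    rw [pvMeasure_cons] at h
    dsimp only at h
    unfold pvE
    rw [rotatesLoop]
    simp only [if_neg (by omega : ¬ ((comb.length : Int) = k))]
    rw [List.append_nil, pvFlat]
    apply List.flatten_eq_nil_iff.mpr
    intro l hl
    simp only [List.mem_map, pvChildren, List.mem_reverse] at hl
    obtain ⟨i, hi, rfl⟩ := hl
    obtain ⟨x, hx, rfl⟩ := hi
    have hxb := PySem.List.mem_pyRange_one.mp hx
    apply ih
    · rw [pvMeasure_cons]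
      simp only [pvMeasure, List.map_nil, List.sum_nil]
      have hlt : ((data.length : Int) - (x + 1)).toNat < ((data.length : Int) - idx).toNat := by omega
      have := Nat.pow_lt_pow_right (by omega : 1 < 2) hlt
      omega
    · simp only [List.length_append, List.length_cons, List.length_nil]
      push_cast
      omega

-- a state without enough indices left to reach length k produces no output
theorem pvDead (data : List Int) (k : Int) : ∀ (N : Nat) (s : List Int × Int × PySem.Set Int),
    pvMeasure (data.length : Int) [s] ≤ N → (s.1.length : Int) < k →
    (data.length : Int) - s.2.1 < k - (s.1.length : Int) → pvE data k s = [] := by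
  intro N
  induction N with
  | zero =>
    intro s h _ _
    exfalso
    have := Nat.two_pow_pos (((data.length : Int) - s.2.1).toNat)
    rw [pvMeasure_cons] at h; omega
  | succ N ih =>
    intro s h hlen hrem
    obtain ⟨comb, idx, select⟩ := s
    simp only at hlen hrem
    rw [pvMeasure_cons] at h
    dsimp only at h
    unfold pvE
    rw [rotatesLoop]
    simp only [if_neg (by omega : ¬ ((comb.length : Int) = k))]
    rw [List.append_nil, pvFlat]
    apply List.flatten_eq_nil_iff.mpr
    intro l hl
    simp only [List.mem_map, pvChildren, List.mem_reverse] at hl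
    obtain ⟨i, hi, rfl⟩ := hl
    obtain ⟨x, hx, rfl⟩ := hi
    have hxb := PySem.List.mem_pyRange_one.mp hx
    have hcl : (comb.length : Int) + 1 < k := by omega
    apply ih
    · rw [pvMeasure_cons]
      simp only [pvMeasure, List.map_nil, List.sum_nil]
      have hlt : ((data.length : Int) - (x + 1)).toNat < ((data.length : Int) - idx).toNat := by omega
      have := Nat.pow_lt_pow_right (by omega : 1 < 2) hlt
      omega
    · simp only [List.length_append, List.length_cons, List.length_nil]
      push_cast
      omega
    · simp only [List.length_append, List.length_cons, List.length_nil]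
      push_cast
      omega

theorem pvDiffFilter (n : Int) (s : PySem.Set Int) :
    PySem.Set.diff (PySem.Set.ofList (PySem.List.pyRange 0 n 1)) s
      = (PySem.List.pyRange 0 n 1).filter (fun j => !(PySem.Set.contains s j)) := by
  rw [PySem.Set.ofList_eq_self_of_nodup _ (PySem.List.nodup_pyRange_one 0 n)]
  rfl

-- the DFS subtree below a reachable state enumerates exactly B's combinations below it
theorem pvKey (data : List Int) (k : Int) :
    ∀ (r : Nat) (idx : Int) (chosen : List Int), (chosen.length : Int) + r = k →
    pvE data k (chosen.map (fun i => PySem.List.pyGetD data i 0), idx, PySem.Set.ofList chosen)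
      = (altCombos (data.length : Int) r idx).map (fun rest => pvRow data (chosen ++ rest)) := by
  intro r
  induction r with
  | zero =>
    intro idx chosen hlen
    unfold pvE
    rw [rotatesLoop]
    simp only [List.length_map, if_pos (by omega : ((chosen.length : Int) = k))]
    rw [rotatesLoop]
    simp only [altCombos, List.map_cons, List.map_nil, List.nil_append, List.append_nil]
    congr 1
    unfold pvRow
    congr 1
    rw [pvDiffFilter]
  | succ r ih =>
    intro idx chosen hlen
    have hg : ∀ i : Int,
        pvE data k (chosen.map (fun j => PySem.List.pyGetD data j 0) ++ [PySem.List.pyGetD data i 0],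
          i + 1, PySem.Set.add (PySem.Set.ofList chosen) i)
        = (altCombos (data.length : Int) r (i + 1)).map
            (fun rest => pvRow data (chosen ++ i :: rest)) := by
      intro i
      have h1 : chosen.map (fun j => PySem.List.pyGetD data j 0) ++ [PySem.List.pyGetD data i 0]
          = (chosen ++ [i]).map (fun j => PySem.List.pyGetD data j 0) := by simp
      have h2 : PySem.Set.add (PySem.Set.ofList chosen) i = PySem.Set.ofList (chosen ++ [i]) :=
        (PySem.Set.ofList_append_singleton chosen i).symm
      rw [h1, h2, ih (i + 1) (chosen ++ [i]) (by simp; omega)]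
      have h3 : ∀ rest : List Int, (chosen ++ [i]) ++ rest = chosen ++ i :: rest := by
        intro rest; simp
      simp only [h3]
    have hdead : ∀ i : Int, (data.length : Int) - r ≤ i → i < (data.length : Int) →
        pvE data k (chosen.map (fun j => PySem.List.pyGetD data j 0) ++ [PySem.List.pyGetD data i 0],
          i + 1, PySem.Set.add (PySem.Set.ofList chosen) i) = [] := by
      intro i hi1 hi2
      apply pvDead data k (pvMeasure (data.length : Int) _) _ le_rfl
      · simp only [List.length_append, List.length_map, List.length_cons, List.length_nil]
        push_cast; omega
      · simp only [List.length_append, List.length_map, List.length_cons, List.length_nil]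
        push_cast; omega
    unfold pvE
    rw [rotatesLoop]
    simp only [List.length_map, if_neg (by omega : ¬ ((chosen.length : Int) = k))]
    rw [List.append_nil, pvFlat, pvChildren]
    rw [List.map_map]
    simp only [Function.comp_def]
    have hrhs : (altCombos (data.length : Int) (r + 1) idx).map (fun rest => pvRow data (chosen ++ rest))
        = ((PySem.List.pyRange idx ((data.length : Int) - r) 1).reverse.map
            (fun i => (altCombos (data.length : Int) r (i + 1)).map
              (fun rest => pvRow data (chosen ++ i :: rest)))).flatten := by
      show ((PySem.List.pyRange ((data.length : Int) - ((r : Int) + 1)) (idx - 1) (-1)).flatMap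
          (fun first => (altCombos (data.length : Int) r (first + 1)).map (fun rest => first :: rest))).map
            (fun rest => pvRow data (chosen ++ rest)) = _
      rw [PySem.List.pyRange_neg_one_eq_reverse]
      have hb : idx - 1 + 1 = idx := by ring
      have ha : (data.length : Int) - ((r : Int) + 1) + 1 = (data.length : Int) - r := by ring
      rw [hb, ha, List.map_flatMap, List.flatMap_def]
      simp only [List.map_map, Function.comp_def]
    rw [hrhs]
    by_cases hsplit : idx ≤ (data.length : Int) - r
    · rw [PySem.List.pyRange_one_append idx ((data.length : Int) - r) (data.length : Int) hsplit (by omega)]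
      rw [List.reverse_append, List.map_append, List.flatten_append]
      have hupper : (((PySem.List.pyRange ((data.length : Int) - r) (data.length : Int) 1).reverse.map
          (fun i => pvE data k (chosen.map (fun j => PySem.List.pyGetD data j 0) ++ [PySem.List.pyGetD data i 0],
            i + 1, PySem.Set.add (PySem.Set.ofList chosen) i))).flatten) = [] := by
        apply List.flatten_eq_nil_iff.mpr
        intro l hl
        simp only [List.mem_map, List.mem_reverse] at hl
        obtain ⟨i, hi, rfl⟩ := hl
        have hib := PySem.List.mem_pyRange_one.mp hi
        exact hdead i hib.1 hib.2
      rw [hupper, List.nil_append]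
      exact congrArg List.flatten (List.map_congr_left (fun i _ => hg i))
    · have hlow : PySem.List.pyRange idx ((data.length : Int) - r) 1 = [] :=
        PySem.List.pyRange_one_eq_nil (by omega)
      rw [hlow]
      simp only [List.reverse_nil, List.map_nil, List.flatten_nil]
      apply List.flatten_eq_nil_iff.mpr
      intro l hl
      simp only [List.mem_map, List.mem_reverse] at hl
      obtain ⟨i, hi, rfl⟩ := hl
      have hib := PySem.List.mem_pyRange_one.mp hi
      exact hdead i (by omega) hib.2

-- ===== VERDICT (by name: the statement is the Claim_ definition above) =====
theorem rotates_spec : Claim_equal_rotates := by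
  unfold Claim_equal_rotates
  intro data k _ _
  unfold Spec_rotates
  by_cases hk : k < 0
  · have h0 : rotates data k = pvE data k ([], 0, PySem.Set.ofList []) := rfl
    rw [h0, pvOver data k (pvMeasure (data.length : Int) _) _ le_rfl (by simpa using hk)]
    simp [rotates_alt, hk]
  · have hk : 0 ≤ k := le_of_not_gt hk
    have h0 : rotates data k
        = pvE data k (List.map (fun i => PySem.List.pyGetD data i 0) [], 0, PySem.Set.ofList []) := rfl
    rw [h0, pvKey data k k.toNat 0 [] (by simp [Int.toNat_of_nonneg hk])]
    rw [rotates_alt]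
    simp [if_neg (not_lt.mpr hk), pvRow]
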